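-- pv_equiv track=rewrite | github.com/pypi-data/pypi-mirror-384 | packages/defermi/defermi-1.0.2-py3-none-any.whl/defermi/defects.py | format_legend_with_charge_kv
-- ===== SOURCE A (Python) =====
-- def format_legend_with_charge_kv(label,charge):
--     """
--     Get label in latex format with charge written with Kröger and Vink notation.
--
--     Parameters
--     ----------
--     label : str
--         Original name of the defect.
--     charge : int or float
--         Charge of the defect. Floats are converted to integer.
--
--     Returns
--     -------
--     string : str
--         Formatted defect name with Kröger and Vink notation.
--     """
--     mod_label = label + '$'
--     charge = int(charge)
--     if charge < 0:
--         for i in range(0,abs(charge)):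
--             if i == 0:
--                 mod_label = mod_label + "^{"
--             mod_label = mod_label + "'"
--         mod_label = mod_label + "}"
--     elif charge == 0:
--         mod_label = mod_label + "^{x}"
--     elif charge > 0:
--         for i in range(0,charge):
--             if i == 0:
--                 mod_label = mod_label + "^{"
--             mod_label = mod_label + "°"
--         mod_label = mod_label + "}"
--
--     mod_label = mod_label + "$"
--
--     return mod_label
-- ===== SOURCE B (Python) =====
-- def format_legend_with_charge_kv(label, charge):
--     """Build the superscript content once, then format with a single template."""
--     charge = int(charge)
--     if charge == 0:
--         inner = "x"
--     else:
--         sym = "'" if charge < 0 else "°"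
--         inner = sym * abs(charge)
--     return f"{label}$^{{{inner}}}$"
-- ===== Notes on version B (the rewrite author's own statement) =====
-- stated objective: simpler
-- what changed: Replaces the three interleaved per-character append loops with computing the superscript content once (string repetition / 'x') and emitting it through a single format template; string repetition avoids per-character concatenation.
import Mathlib
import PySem

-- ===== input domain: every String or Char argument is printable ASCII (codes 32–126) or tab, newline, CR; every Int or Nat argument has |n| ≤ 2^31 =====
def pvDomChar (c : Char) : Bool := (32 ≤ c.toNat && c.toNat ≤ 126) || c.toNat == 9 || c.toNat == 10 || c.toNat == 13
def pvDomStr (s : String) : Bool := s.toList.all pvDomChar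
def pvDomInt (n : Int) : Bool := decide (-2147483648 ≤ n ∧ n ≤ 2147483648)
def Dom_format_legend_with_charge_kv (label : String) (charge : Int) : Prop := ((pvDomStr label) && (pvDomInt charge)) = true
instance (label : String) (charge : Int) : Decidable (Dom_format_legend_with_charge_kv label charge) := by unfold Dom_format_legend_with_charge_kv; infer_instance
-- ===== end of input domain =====

-- B builds the superscript content once and formats with a single template, instead of
-- A's three interleaved per-character append loops: simpler decomposition, same cost.


-- ===== PORT A =====
-- Transliteration of A (strings handled as List Char so the kernel can reduce them;
-- int(charge) is the identity on an Int argument; mod_label = label + '$' inlined).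
def format_legend_with_charge_kv (label : String) (charge : Int) : String :=
  String.ofList
    ((if charge < 0 then
        ((PySem.List.pyRange 0 |charge|).foldl
          (fun acc i => (if i == 0 then acc ++ ['^', '{'] else acc) ++ ['\''])
          (label.toList ++ ['$'])) ++ ['}']
      else if charge == 0 then
        (label.toList ++ ['$']) ++ ['^', '{', 'x', '}']
      else
        ((PySem.List.pyRange 0 charge).foldl
          (fun acc i => (if i == 0 then acc ++ ['^', '{'] else acc) ++ ['°'])
          (label.toList ++ ['$'])) ++ ['}']) ++ ['$'])

-- ===== PORT B =====
def format_legend_with_charge_kv_alt (label : String) (charge : Int) : String :=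
  String.ofList (label.toList ++ ['$', '^', '{'] ++
    (if charge = 0 then ['x']
     else List.replicate charge.natAbs (if charge < 0 then '\'' else '°')) ++ ['}', '$'])

-- ===== PRECONDITION & SPEC =====
def Spec_format_legend_with_charge_kv (label : String) (charge : Int) (out : String) : Prop := out = format_legend_with_charge_kv_alt label charge
instance (label : String) (charge : Int) (out : String) : Decidable (Spec_format_legend_with_charge_kv label charge out) := by unfold Spec_format_legend_with_charge_kv; infer_instance

-- ===== CLAIM (what is proved, stated in full; the proofs are below) =====
def Claim_equal_format_legend_with_charge_kv : Prop := ∀ (label : String) (charge : Int), Dom_format_legend_with_charge_kv label charge → Spec_format_legend_with_charge_kv label charge (format_legend_with_charge_kv label charge)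

-- ===== LEMMAS AND PROOFS =====

-- A's append loop over range(0, n) (n ≥ 1) produces "^{" followed by n copies of c.
lemma foldl_kv (c : Char) (m : List Char) : ∀ (n : Nat), 1 ≤ n →
    (PySem.List.pyRange 0 (n : Int)).foldl
      (fun acc i => (if i == 0 then acc ++ ['^', '{'] else acc) ++ [c]) m
    = m ++ ['^', '{'] ++ List.replicate n c := by
  intro n
  induction n with
  | zero => omega
  | succ k ih =>
    intro _
    have hcast : ((k + 1 : Nat) : Int) = (k : Int) + 1 := by push_cast; ring
    rw [hcast, PySem.List.pyRange_one_succ_right (by positivity), List.foldl_append]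
    rcases Nat.eq_zero_or_pos k with hk | hk
    · subst hk; simp [PySem.List.pyRange]
    · rw [ih hk]
      simp [hk.ne', List.replicate_succ']

-- ===== VERDICT (by name: the statement is the Claim_ definition above) =====
theorem format_legend_with_charge_kv_spec : Claim_equal_format_legend_with_charge_kv := by
  intro label charge _
  unfold Spec_format_legend_with_charge_kv format_legend_with_charge_kv format_legend_with_charge_kv_alt
  rcases lt_trichotomy charge 0 with hneg | hzero | hpos
  · have habs : |charge| = (charge.natAbs : Int) := Int.abs_eq_natAbs charge
    have h1 : 1 ≤ charge.natAbs := by omega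
    rw [if_pos hneg, habs, foldl_kv '\'' (label.toList ++ ['$']) charge.natAbs h1,
      if_neg hneg.ne]
    simp [hneg]
  · subst hzero; simp
  · have hn : ¬ charge < 0 := by omega
    have hz : ¬ charge = 0 := by omega
    have h1 : 1 ≤ charge.natAbs := by omega
    rw [if_neg hn, if_neg (show ¬ (charge == 0) = true by simpa using hz),
      show PySem.List.pyRange 0 charge = PySem.List.pyRange 0 (charge.natAbs : Int) by
        congr 1; omega,
      foldl_kv '°' (label.toList ++ ['$']) charge.natAbs h1, if_neg hz]
    simp [hn]
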